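/-
  THE TRIPS FOR `[` `{` AND `]` `}`  (lemmas for Json/Jsmn/CorrectValue.lean).

  open_trip    `[` / `{`: a token is allocated, left OPEN (start set, end = -1), the superior's size bumped, the new token becomes the superior
  close_trip   `]` / `}` when the innermost open token is `a` and every token after it is closed: `a` gets its end; the new superior is
               WITHOUT parent links the next open token below `a` (second backward scan), WITH parent links `a`'s parent
-/
import Json.Jsmn.CorrectLoop

namespace Jsmn
open Json

section
variable {cfg : Config} {js : List UInt8} {n : Nat}

/-- The type jsmn gives the token for an opening bracket / expects for a closing one. -/
def openType (c : UInt8) : Nat := if c == 0x7b then JSMN_OBJECT else JSMN_ARRAY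

/-- `[` or `{`. -/
theorem open_trip (hjs : js.length < 2147483648) {c : UInt8} (hc : c = 0x7b ∨ c = 0x5b) {pos k : Nat} {sup : Int} {ts : Tokens} {cnt : Int}
    {rest : List UInt8} {bound : Nat} (hd : js.drop pos = c :: rest) (hlen : ts.length = n) (hk : k < n) (hn : n ≤ 2147483648)
    (hcnt0 : 0 ≤ cnt) (hcnt1 : cnt + 1 < 2147483648) (hsup : SupOk ts k sup bound) (hty : SupType ts sup) :
    Reaches cfg js n ⟨⟨pos, k, sup⟩, some ts, cnt⟩
      ⟨⟨pos + 1, k + 1, k⟩, some (bump (ts.set k (stampTok cfg ⟨openType c, pos, -1, 0, sup⟩ (ts.getD k default))) sup), cnt + 1⟩ := by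
  have hlt := lt_of_drop hd
  have hc0 : (c != 0) = true := by rcases hc with rfl | rfl <;> decide
  refine Reaches.trip (cfg := cfg) (n := n) (s := ⟨⟨pos, k, sup⟩, some ts, cnt⟩)
    (s' := ⟨⟨pos, k + 1, k⟩, some (bump (ts.set k (stampTok cfg ⟨openType c, pos, -1, 0, sup⟩ (ts.getD k default))) sup), cnt + 1⟩)
    hd hc0 ?_ (Nat.le_refl _) (by simp; omega)
  intro fuel _
  have h1 : (c == 0x7b || c == 0x5b) = true := by rcases hc with rfl | rfl <;> decide
  have hk' : ¬ (k ≥ n) := by omega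
  have e1 : i32 (((k + 1 : Nat) : Int) - 1) = k := by rw [i32_of_range (by omega) (by omega)]; omega
  simp only [body, h1, if_true, openBracket, allocToken, hk', if_false]
  rw [u32_succ (by omega), i32_of_range (by omega : -2147483648 ≤ cnt + 1) hcnt1]
  simp only [e1, i32_nat (by omega : pos < 2147483648)]
  rcases hsup with rfl | ⟨a, rfl, hak, h0, h1⟩
  · cases hl : cfg.parentLinks <;>
      simp [bump, stampTok, hl, openType, List.set_set, hlen, hk]
  · have hne : ((a : Int) != -1) = true := by simp
    have hstrict : ∀ T : Token, (cfg.strict && (tokAt (ts.set k T) a).type == JSMN_OBJECT) = false := by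
      intro T
      rcases hty with h | ⟨a', h, h'⟩
      · omega
      · have : a' = a := by omega
        subst this
        rw [tokAt_nat, getD_set_other _ _ (by omega)]
        rcases h' with h' | ⟨h', _⟩ <;> simp [h', JSMN_ARRAY, JSMN_OBJECT, JSMN_STRING, -List.getD_eq_getElem?_getD]
    simp only [hne, hstrict, if_true, Bool.false_eq_true, if_false, tokUpd_nat, bump, getD_set_other ts _ (Nat.ne_of_lt hak)]
    cases hl : cfg.parentLinks <;>
      simp [stampTok, hl, openType, List.set_set, hlen, hk, List.set_comm _ _ (Nat.ne_of_lt hak), Nat.ne_of_lt hak]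
/-- The walk up the parent links from token `i` to the open token `a`, when every token on the way is closed and has its parent in `[a, itself)`. -/
theorem closeLinks_walk (type : Nat) (s : St) (ts : Tokens) {a : Nat} (hopen : (ts.getD a default).isOpen = true)
    (hty : (ts.getD a default).type = type) :
    ∀ (i fuel : Nat), a ≤ i → i - a < fuel →
      (∀ j, a < j → j ≤ i → (ts.getD j default).isOpen = false ∧ (a : Int) ≤ (ts.getD j default).parent ∧ (ts.getD j default).parent < j) →
      closeLinks type s ts fuel (i : Int) = some (.next ⟨⟨s.p.pos, s.p.toknext, (ts.getD a default).parent⟩,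
        some (ts.set a { ts.getD a default with «end» := i32 (s.p.pos + 1) }), s.count⟩)
  | i, 0, _, hf, _ => by omega
  | i, fuel + 1, hai, hf, hw => by
    by_cases hia : i = a
    · subst hia
      simp only [closeLinks, tokAt_nat, hopen, if_true, hty, bne_self_eq_false, Bool.false_eq_true, if_false, tokUpd_nat]
    · obtain ⟨h1, h2, h3⟩ := hw i (by omega) (Nat.le_refl _)
      obtain ⟨j, hj⟩ : ∃ j : Nat, (ts.getD i default).parent = j := ⟨(ts.getD i default).parent.toNat, by omega⟩
      have hne : ((j : Int) == -1) = false := by simp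
      simp only [closeLinks, tokAt_nat, h1, Bool.false_eq_true, if_false, hj, hne]
      exact closeLinks_walk type s ts hopen hty j fuel (by omega) (by omega) (fun j' h1 h2 => hw j' h1 (by omega))

/-- `]` or `}` when the innermost open token is `a`. -/
theorem close_trip (hjs : js.length < 2147483648) {c : UInt8} (hc : c = 0x7d ∨ c = 0x5d) {pos k a : Nat} {sup : Int} {ts : Tokens} {cnt : Int}
    {rest : List UInt8} (hd : js.drop pos = c :: rest) (hak : a < k) (hk : k ≤ 2147483648) (hopen : (ts.getD a default).isOpen = true)
    (hty : (ts.getD a default).type = if c == 0x7d then JSMN_OBJECT else JSMN_ARRAY)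
    (hcl : ∀ i, a < i → i < k → (ts.getD i default).isOpen = false)
    (hpar : cfg.parentLinks = true → ∀ i, a < i → i < k → (a : Int) ≤ (ts.getD i default).parent ∧ (ts.getD i default).parent < i) :
    Reaches cfg js n ⟨⟨pos, k, sup⟩, some ts, cnt⟩
      ⟨⟨pos + 1, k, if cfg.parentLinks then (ts.getD a default).parent else openBelow ts a⟩,
        some (ts.set a { ts.getD a default with «end» := ((pos + 1 : Nat) : Int) }), cnt⟩ := by
  have hlt := lt_of_drop hd
  have hc0 : (c != 0) = true := by rcases hc with rfl | rfl <;> decide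
  refine Reaches.trip (cfg := cfg) (n := n) (s := ⟨⟨pos, k, sup⟩, some ts, cnt⟩)
    (s' := ⟨⟨pos, k, if cfg.parentLinks then (ts.getD a default).parent else openBelow ts a⟩,
        some (ts.set a { ts.getD a default with «end» := ((pos + 1 : Nat) : Int) }), cnt⟩)
    hd hc0 ?_ (Nat.le_refl _) (by simp; omega)
  intro fuel _
  have h1 : (c == 0x7b || c == 0x5b) = false := by rcases hc with rfl | rfl <;> decide
  have h2 : (c == 0x7d || c == 0x5d) = true := by rcases hc with rfl | rfl <;> decide
  have e1 : i32 ((pos : Int) + 1) = ((pos + 1 : Nat) : Int) := by rw [i32_of_range (by omega) (by omega)]; simp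
  simp only [body, h1, h2, Bool.false_eq_true, if_false, if_true, closeBracket]
  cases hl : cfg.parentLinks
  · have e2 : i32 ((k : Int) - 1) = ((k - 1 : Nat) : Int) := by rw [i32_of_range (by omega) (by omega)]; omega
    have e3 : (((k - 1 : Nat) : Int) + 1).toNat = k := by omega
    have e4 : ¬ (((k - 1 : Nat) : Int) < -1) := by omega
    have hty' : ((ts.getD a default).type != if c == 0x7d then JSMN_OBJECT else JSMN_ARRAY) = false := by rw [hty]; simp
    have hclosed : ((ts.set a { ts.getD a default with «end» := ((pos + 1 : Nat) : Int) }).getD a default).isOpen = false := by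
      by_cases hlen : a < ts.length
      · have : ((((pos + 1 : Nat) : Int)) == -1) = false := by rw [beq_eq_false_iff_ne]; omega
        rw [getD_set_self _ _ hlen]; simp only [Token.isOpen, this, Bool.and_false]
      · have : (ts.getD a default) = default := by
          rw [List.getD_eq_getElem?_getD, List.getElem?_eq_none (by omega)]; rfl
        rw [this] at hopen; exact absurd hopen (by decide)
    have hscan : scanOpen (ts.set a { ts.getD a default with «end» := ((pos + 1 : Nat) : Int) }) (a + 1) = scanOpen ts a := by
      simp only [scanOpen, hclosed, Bool.false_eq_true, if_false]
      exact scanOpen_congr a (fun i hi => by rw [getD_set_other _ _ (by omega)])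
    simp only [Bool.false_eq_true, if_false, closeScan, e2, e3, e4, scanOpen_eq_some hopen k hak hcl, hty', e1, hscan, openBelow]
    cases scanOpen ts a <;> rfl
  · have hk0 : ¬ (k < 1) := by omega
    have hw := closeLinks_walk (if c == 0x7d then JSMN_OBJECT else JSMN_ARRAY) ⟨⟨pos, k, sup⟩, some ts, cnt⟩ ts hopen hty (k - 1) (k + 1)
      (by omega) (by omega) (fun j h1 h2 => ⟨hcl j h1 (by omega), hpar hl j h1 (by omega)⟩)
    simp only [if_true, hk0, if_false, hw, e1]
end
end Jsmn
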